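-- pv_equiv track=rewrite | github.com/MartinCampbell1/quorum | orchestrator/execution_brief.py | _preferred_provider
-- ===== SOURCE A (Python) =====
-- def _preferred_provider(session: dict, requested: str | None = None) -> str:
--     if requested and str(requested).strip():
--         return str(requested).strip().lower()
--     agents = list(session.get("agents") or [])
--     for preferred_role in ("judge", "chairman", "director", "planner"):
--         for agent in agents:
--             if str(agent.get("role") or "").strip().lower() == preferred_role:
--                 provider = str(agent.get("provider") or "").strip().lower()
--                 if provider:
--                     return provider
--     for agent in agents:
--         provider = str(agent.get("provider") or "").strip().lower()
--         if provider:
--             return provider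
--     return "codex"
-- ===== SOURCE B (Python) =====
-- def _preferred_provider(session: dict, requested: str | None = None) -> str:
--     req = str(requested or "").strip()
--     if req:
--         return req.lower()
--     prio = {"judge": 0, "chairman": 1, "director": 2, "planner": 3}
--     best_rank = 5
--     best = None
--     for agent in (session.get("agents") or []):
--         provider = str(agent.get("provider") or "").strip().lower()
--         if provider:
--             rank = prio.get(str(agent.get("role") or "").strip().lower(), 4)
--             if rank < best_rank:
--                 best_rank = rank
--                 best = provider
--     return best if best is not None else "codex"
-- ===== Notes on version B (the rewrite author's own statement) =====
-- stated objective: alternative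
-- what changed: Replaces A's four per-role scans plus a fifth fallback scan with a single pass that keeps the provider of the agent with the smallest role-priority rank (ranks 0-3 for the preferred roles, 4 otherwise), first occurrence winning ties.
import Mathlib
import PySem

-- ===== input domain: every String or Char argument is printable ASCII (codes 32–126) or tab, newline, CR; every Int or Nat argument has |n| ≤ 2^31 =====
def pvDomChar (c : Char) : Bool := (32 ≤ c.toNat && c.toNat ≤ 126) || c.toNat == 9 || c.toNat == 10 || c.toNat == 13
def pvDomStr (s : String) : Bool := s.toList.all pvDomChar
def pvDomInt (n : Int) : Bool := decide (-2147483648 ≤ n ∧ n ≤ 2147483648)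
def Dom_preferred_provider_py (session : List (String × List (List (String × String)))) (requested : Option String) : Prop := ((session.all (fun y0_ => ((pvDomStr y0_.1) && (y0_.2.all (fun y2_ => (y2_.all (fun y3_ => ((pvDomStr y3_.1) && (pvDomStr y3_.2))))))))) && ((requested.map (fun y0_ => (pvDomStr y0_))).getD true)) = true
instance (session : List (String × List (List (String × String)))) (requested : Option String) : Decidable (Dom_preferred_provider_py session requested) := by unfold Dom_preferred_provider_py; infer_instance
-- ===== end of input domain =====

-- ===== PORT A =====
-- B replaces A's four per-role scans plus a fallback scan with one pass keeping the
-- provider of minimal role-priority rank (first occurrence wins); return values proved equal.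
-- norm x = str(agent.get(k) or "").strip().lower()
def pvNormA (a : List (String × String)) (k : String) : String :=
  PySem.Str.lower (PySem.Str.strip (((PySem.Dict.mk a).get? k).getD ""))

-- inner loop: for agent in agents: if role == pr and provider nonempty: return provider
def pvA_roleScan (pr : String) : List (List (String × String)) → Option String
  | [] => none
  | a :: rest =>
    if pvNormA a "role" == pr then
      let provider := pvNormA a "provider"
      if provider ≠ "" then some provider else pvA_roleScan pr rest
    else pvA_roleScan pr rest

-- outer loop over the preferred roles
def pvA_rolesLoop (agents : List (List (String × String))) : List String → Option String
  | [] => none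
  | r :: rs =>
    match pvA_roleScan r agents with
    | some p => some p
    | none => pvA_rolesLoop agents rs

-- final fallback scan: first nonempty normalized provider
def pvA_fallback : List (List (String × String)) → Option String
  | [] => none
  | a :: rest =>
    let provider := pvNormA a "provider"
    if provider ≠ "" then some provider else pvA_fallback rest

def pvA_body (session : List (String × List (List (String × String)))) : String :=
  match pvA_rolesLoop (((PySem.Dict.mk session).get? "agents").getD []) ["judge", "chairman", "director", "planner"] with
  | some p => p
  | none =>
    match pvA_fallback (((PySem.Dict.mk session).get? "agents").getD []) with
    | some p => p
    | none => "codex"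

def preferred_provider_py (session : List (String × List (List (String × String)))) (requested : Option String) : String :=
  match requested with
  | some r =>
    if r ≠ "" ∧ PySem.Str.strip r ≠ "" then PySem.Str.lower (PySem.Str.strip r)
    else pvA_body session
  | none => pvA_body session


-- ===== PORT B =====
-- provider = str(agent.get(k) or "").strip().lower()  (same normalisation as A, own helper)
def pvNormB (a : List (String × String)) (k : String) : String :=
  PySem.Str.lower (PySem.Str.strip (((PySem.Dict.mk a).get? k).getD ""))

-- prio = {"judge": 0, "chairman": 1, "director": 2, "planner": 3}
def pvPrio : PySem.Dict String Nat :=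
  PySem.Dict.mk [("judge", 0), ("chairman", 1), ("director", 2), ("planner", 3)]

-- single pass: keep the first provider of minimal rank (rank = prio.get(role, 4))
def pvB_scan : List (List (String × String)) → Nat → Option String → Option String
  | [], _, best => best
  | a :: rest, bestRank, best =>
    let provider := pvNormB a "provider"
    if provider ≠ "" then
      let rank := (pvPrio.get? (pvNormB a "role")).getD 4
      if rank < bestRank then pvB_scan rest rank (some provider)
      else pvB_scan rest bestRank best
    else pvB_scan rest bestRank best

def preferred_provider_py_alt (session : List (String × List (List (String × String)))) (requested : Option String) : String :=
  let req := PySem.Str.strip (requested.getD "")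
  if req ≠ "" then PySem.Str.lower req
  else (pvB_scan (((PySem.Dict.mk session).get? "agents").getD []) 5 none).getD "codex"


-- ===== PRECONDITION & SPEC =====
def Spec_preferred_provider_py (session : List (String × List (List (String × String)))) (requested : Option String) (out : String) : Prop := out = preferred_provider_py_alt session requested
instance (session : List (String × List (List (String × String)))) (requested : Option String) (out : String) : Decidable (Spec_preferred_provider_py session requested out) := by unfold Spec_preferred_provider_py; infer_instance

-- ===== CLAIM (what is proved, stated in full; the proofs are below) =====
def Claim_equal_preferred_provider_py : Prop := ∀ (session : List (String × List (List (String × String)))) (requested : Option String), Dom_preferred_provider_py session requested → Spec_preferred_provider_py session requested (preferred_provider_py session requested)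

-- ===== LEMMAS AND PROOFS =====
-- rank of an agent, and A's answer restricted to ranks < k (proof-side characterisation)
def pvRank (a : List (String × String)) : Nat := (pvPrio.get? (pvNormA a "role")).getD 4

def pvAk (agents : List (List (String × String))) (k : Nat) : Option String :=
  match pvA_rolesLoop agents (List.take k ["judge", "chairman", "director", "planner"]) with
  | some p => some p
  | none => if k = 5 then pvA_fallback agents else none

theorem pvRank_def (a : List (String × String)) :
    pvRank a = (if pvNormA a "role" = "judge" then 0 else
                if pvNormA a "role" = "chairman" then 1 else
                if pvNormA a "role" = "director" then 2 else
                if pvNormA a "role" = "planner" then 3 else 4) := by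
  simp only [pvRank, pvPrio, PySem.Dict.get?_mk_cons]
  split_ifs with h0 h1 h2 h3 <;> simp_all [PySem.Dict.get?]

theorem pvRank_le (a : List (String × String)) : pvRank a ≤ 4 := by
  rw [pvRank_def]; split_ifs <;> omega

-- an empty-provider agent is transparent to A's scans
theorem rolesLoop_skip (a : List (String × String)) (rest : List (List (String × String)))
    (rs : List String) (hp : pvNormA a "provider" = "") :
    pvA_rolesLoop (a :: rest) rs = pvA_rolesLoop rest rs := by
  induction rs with
  | nil => rfl
  | cons r rs ih =>
    simp [pvA_rolesLoop, pvA_roleScan, hp, ih]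

theorem pvAk_skip (a : List (String × String)) (rest : List (List (String × String)))
    (k : Nat) (hp : pvNormA a "provider" = "") :
    pvAk (a :: rest) k = pvAk rest k := by
  simp only [pvAk, rolesLoop_skip a rest _ hp, pvA_fallback, hp]
  simp

-- the cons step of the characterisation, for a nonempty provider
theorem pvAk_cons (a : List (String × String)) (rest : List (List (String × String)))
    (k : Nat) (hk : k ≤ 5) (hp : pvNormA a "provider" ≠ "") :
    pvAk (a :: rest) k =
      if pvRank a < k then
        match pvAk rest (pvRank a) with
        | some q => some q
        | none => some (pvNormA a "provider")
      else pvAk rest k := by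
  rw [pvRank_def]
  by_cases h0 : pvNormA a "role" = "judge"
  · interval_cases k <;>
      simp [pvAk, pvA_rolesLoop, pvA_roleScan, pvA_fallback, h0, hp] <;>
      (cases pvA_roleScan "judge" rest <;> simp)
  · by_cases h1 : pvNormA a "role" = "chairman"
    · interval_cases k <;>
        simp [pvAk, pvA_rolesLoop, pvA_roleScan, pvA_fallback, h0, h1, hp] <;>
        (cases pvA_roleScan "judge" rest <;> cases pvA_roleScan "chairman" rest <;> simp)
    · by_cases h2 : pvNormA a "role" = "director"
      · interval_cases k <;>
          simp [pvAk, pvA_rolesLoop, pvA_roleScan, pvA_fallback, h0, h1, h2, hp] <;>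
          (cases pvA_roleScan "judge" rest <;> cases pvA_roleScan "chairman" rest <;>
           cases pvA_roleScan "director" rest <;> simp)
      · by_cases h3 : pvNormA a "role" = "planner"
        · interval_cases k <;>
            simp [pvAk, pvA_rolesLoop, pvA_roleScan, pvA_fallback, h0, h1, h2, h3, hp] <;>
            (cases pvA_roleScan "judge" rest <;> cases pvA_roleScan "chairman" rest <;>
             cases pvA_roleScan "director" rest <;> cases pvA_roleScan "planner" rest <;> simp)
        · interval_cases k <;>
            simp [pvAk, pvA_rolesLoop, pvA_roleScan, pvA_fallback, h0, h1, h2, h3, hp] <;>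
            (cases pvA_roleScan "judge" rest <;> cases pvA_roleScan "chairman" rest <;>
             cases pvA_roleScan "director" rest <;> cases pvA_roleScan "planner" rest <;> simp)

-- B's single scan computes A's restricted answer
theorem scan_eq (agents : List (List (String × String))) (k : Nat) (best : Option String)
    (hk : k ≤ 5) :
    pvB_scan agents k best =
      match pvAk agents k with
      | some p => some p
      | none => best := by
  induction agents generalizing k best with
  | nil =>
    have hnil : ∀ rs : List String, pvA_rolesLoop [] rs = none := by
      intro rs; induction rs with
      | nil => rfl
      | cons r rs ih => simp [pvA_rolesLoop, pvA_roleScan, ih]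
    simp [pvB_scan, pvAk, hnil, pvA_fallback]
  | cons a rest ih =>
    by_cases hp : pvNormA a "provider" = ""
    · have hB : pvNormB a "provider" = "" := hp
      simp only [pvB_scan, hB, ne_eq, not_true_eq_false, if_false, pvAk_skip a rest k hp]
      exact ih k best hk
    · have hB : pvNormB a "provider" ≠ "" := hp
      have hrk : (pvPrio.get? (pvNormB a "role")).getD 4 = pvRank a := rfl
      simp only [pvB_scan, hB, ne_eq, not_false_eq_true, if_true, hrk]
      rw [pvAk_cons a rest k hk hp]
      by_cases hlt : pvRank a < k
      · have hAB : pvNormB a "provider" = pvNormA a "provider" := rfl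
        rw [hAB, ih (pvRank a) (some (pvNormA a "provider")) (by have := pvRank_le a; omega)]
        simp only [if_pos hlt]
        cases pvAk rest (pvRank a) <;> rfl
      · rw [ih k best hk]
        simp [hlt]

theorem body_eq (session : List (String × List (List (String × String)))) :
    pvA_body session =
      (pvB_scan (((PySem.Dict.mk session).get? "agents").getD []) 5 none).getD "codex" := by
  unfold pvA_body
  rw [scan_eq _ 5 none (by omega)]
  simp only [pvAk, List.take]
  cases pvA_rolesLoop (((PySem.Dict.mk session).get? "agents").getD [])
      ["judge", "chairman", "director", "planner"] <;>
    cases pvA_fallback (((PySem.Dict.mk session).get? "agents").getD []) <;> simp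

-- ===== VERDICT (by name: the statement is the Claim_ definition above) =====
theorem preferred_provider_py_spec : Claim_equal_preferred_provider_py := by
  intro session requested _
  have hse : PySem.Str.strip ("" : String) = "" := by decide
  unfold Spec_preferred_provider_py
  cases requested with
  | none =>
    show pvA_body session = preferred_provider_py_alt session none
    unfold preferred_provider_py_alt
    simp only [Option.getD, hse, ne_eq, not_true_eq_false, if_false]
    exact body_eq session
  | some r =>
    show (if r ≠ "" ∧ PySem.Str.strip r ≠ "" then PySem.Str.lower (PySem.Str.strip r)
          else pvA_body session) = preferred_provider_py_alt session (some r)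
    unfold preferred_provider_py_alt
    show _ = if PySem.Str.strip r ≠ "" then PySem.Str.lower (PySem.Str.strip r)
        else (pvB_scan (((PySem.Dict.mk session).get? "agents").getD []) 5 none).getD "codex"
    by_cases hs : PySem.Str.strip r = ""
    · rw [if_neg (by simp [hs]), if_neg (by simp [hs])]
      exact body_eq session
    · have hr0 : r ≠ "" := fun h => hs (by rw [h]; exact hse)
      rw [if_pos ⟨hr0, hs⟩, if_pos hs]
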